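-- pv_equiv track=rewrite | github.com/clairhardt98/PythonAlgo | programmers_Test/delete_chained_char.py | solution
-- ===== SOURCE A (Python) =====
-- def solution(s):
--     c=list(s)
--     stack=[]
--     for i in c:
--         if stack:
--             if stack[-1]==i:
--                 stack.pop()
--             else:
--                 stack.append(i)
--         else:
--             stack.append(i)
--
--     if stack:
--         return 0
--     else:
--         return 1
-- ===== SOURCE B (Python) =====
-- def _remove_pairs(t):
--     # one left-to-right pass: drop every adjacent equal pair it meets
--     out = []
--     i = 0
--     while i < len(t):
--         if i + 1 < len(t) and t[i] == t[i + 1]: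
--             i += 2
--         else:
--             out.append(t[i])
--             i += 1
--     return out
--
-- def solution(s):
--     t = list(s)
--     while True:
--         r = _remove_pairs(t)
--         if r == t:
--             break
--         t = r
--     return 1 if not t else 0
-- ===== Notes on version B (the rewrite author's own statement) =====
-- stated objective: alternative
-- what changed: Replaces the single-pass stack with a fixed-point loop that repeatedly deletes the first adjacent equal pair until none remains; correctness rests on confluence of pair cancellation (unique normal form).
import Mathlib
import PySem

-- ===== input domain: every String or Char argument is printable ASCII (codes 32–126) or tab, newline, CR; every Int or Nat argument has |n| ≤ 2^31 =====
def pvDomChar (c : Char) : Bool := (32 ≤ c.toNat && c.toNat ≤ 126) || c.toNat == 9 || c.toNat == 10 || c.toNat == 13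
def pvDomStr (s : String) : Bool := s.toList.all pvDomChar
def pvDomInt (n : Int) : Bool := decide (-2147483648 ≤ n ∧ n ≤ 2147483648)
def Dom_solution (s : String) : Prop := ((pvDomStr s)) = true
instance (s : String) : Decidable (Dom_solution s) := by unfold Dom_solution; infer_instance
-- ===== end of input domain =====

-- B replaces A's single-pass stack with a fixed-point loop deleting adjacent equal
-- pairs until none remains (alternative algorithm, relying on confluence of cancellation).

-- ===== PORT A =====
-- one loop step of A: push i, or pop when the top of the stack equals i
def stepA (stack : List Char) (i : Char) : List Char :=
  if stack ≠ [] then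
    if stack.getLast? = some i then stack.dropLast else stack ++ [i]
  else stack ++ [i]

def solution (s : String) : Int :=
  let c := s.toList
  let stack := c.foldl stepA []
  if stack ≠ [] then 0 else 1

-- ===== PORT B =====
-- Source B's _remove_pairs: one left-to-right pass dropping every adjacent equal pair it meets
def removePairs : List Char → List Char
  | [] => []
  | [c] => [c]
  | a :: b :: t => if a = b then removePairs t else a :: removePairs (b :: t)

theorem removePairs_length_le : ∀ (l : List Char), (removePairs l).length ≤ l.length
  | [] => le_refl _
  | [_] => le_refl _
  | a :: b :: t => by
    by_cases hab : a = b
    · simp only [removePairs, if_pos hab, List.length_cons]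
      have := removePairs_length_le t
      omega
    · simp only [removePairs, if_neg hab, List.length_cons]
      have := removePairs_length_le (b :: t)
      simp only [List.length_cons] at this
      omega

theorem removePairs_ne_lt (l : List Char) (h : removePairs l ≠ l) :
    (removePairs l).length < l.length := by
  induction l with
  | nil => simp [removePairs] at h
  | cons a t ih =>
    cases t with
    | nil => simp [removePairs] at h
    | cons b t' =>
      by_cases hab : a = b
      · simp only [removePairs, if_pos hab, List.length_cons]
        have := removePairs_length_le t'
        omega
      · simp only [removePairs, if_neg hab] at h ⊢
        have hne : removePairs (b :: t') ≠ b :: t' := fun he => h (by rw [he])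
        have := ih ?_
        · simp only [List.length_cons] at this ⊢; omega
        · exact hne

-- Source B's while-loop: iterate _remove_pairs to a fixed point
def loopB (t : List Char) : List Char :=
  let r := removePairs t
  if h : r = t then t else loopB r
termination_by t.length
decreasing_by exact removePairs_ne_lt t h

def solution_alt (s : String) : Int :=
  let t := loopB s.toList
  if t = [] then 1 else 0

-- ===== PRECONDITION & SPEC =====
def Spec_solution (s : String) (out : Int) : Prop := out = solution_alt s
instance (s : String) (out : Int) : Decidable (Spec_solution s out) := by unfold Spec_solution; infer_instance

-- ===== CLAIM (what is proved, stated in full; the proofs are below) =====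
def Claim_equal_solution : Prop := ∀ (s : String), Dom_solution s → Spec_solution s (solution s)

-- ===== LEMMAS AND PROOFS =====

-- head-top version of A's stack step
def stepH (c : Char) : List Char → List Char
  | [] => [c]
  | d :: ds => if d = c then ds else c :: d :: ds

-- canonical right-to-left reduction (the normal form)
def red : List Char → List Char
  | [] => []
  | c :: t => stepH c (red t)

theorem stepA_eq (st : List Char) (c : Char) :
    stepA st c = (stepH c st.reverse).reverse := by
  cases h : st.reverse with
  | nil => simp_all [stepA, stepH, List.reverse_eq_nil_iff.mp h]
  | cons d ds =>
    have hst : st = ds.reverse ++ [d] := by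
      have := congrArg List.reverse h; simpa using this
    subst hst
    by_cases hdc : d = c <;> simp [stepA, stepH, hdc]

theorem foldl_stepA (w : List Char) : ∀ (st : List Char),
    w.foldl stepA st = (w.reverse.foldr stepH st.reverse).reverse := by
  induction w with
  | nil => simp
  | cons c t ih =>
    intro st
    simp [List.foldl_cons, ih, stepA_eq, List.foldr_append]

-- a one-pair deletion step
def Step (l l' : List Char) : Prop := ∃ u c v, l = u ++ c :: c :: v ∧ l' = u ++ v

-- red produces irreducible (no adjacent duplicates) lists
theorem red_chain (l : List Char) : List.IsChain (· ≠ ·) (red l) := by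
  induction l with
  | nil => exact .nil
  | cons c t ih =>
    simp only [red]
    cases h : red t with
    | nil => exact .singleton _
    | cons d ds =>
      rw [h] at ih
      by_cases hdc : d = c
      · simp only [stepH, if_pos hdc]; exact ih.tail
      · simp only [stepH, if_neg hdc]
        exact List.isChain_cons_cons.mpr ⟨fun hcd => hdc hcd.symm, ih⟩

theorem stepH_stepH (c : Char) (l : List Char) (h : List.IsChain (· ≠ ·) l) :
    stepH c (stepH c l) = l := by
  cases l with
  | nil => simp [stepH]
  | cons d ds =>
    by_cases hdc : d = c
    · subst hdc
      cases ds with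
      | nil => simp [stepH]
      | cons e es =>
        have hde : d ≠ e := List.rel_of_isChain_cons_cons h
        simp [stepH, Ne.symm hde]
    · simp [stepH, hdc]

theorem red_append_pair (c : Char) : ∀ (u v : List Char),
    red (u ++ c :: c :: v) = red (u ++ v) := by
  intro u v
  induction u with
  | nil => simp [red]; exact stepH_stepH c (red v) (red_chain v)
  | cons a u' ih => simp [red] at ih ⊢; rw [ih]

theorem red_Step {l l' : List Char} (h : Step l l') : red l' = red l := by
  obtain ⟨u, c, v, rfl, rfl⟩ := h
  exact (red_append_pair c u v).symm

theorem red_RTG {l l' : List Char} (h : Relation.ReflTransGen Step l l') : red l' = red l := by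
  induction h with
  | refl => rfl
  | tail _ hstep ih => rw [red_Step hstep, ih]

theorem Step_cons {l l' : List Char} (a : Char) (h : Step l l') : Step (a :: l) (a :: l') := by
  obtain ⟨u, c, v, rfl, rfl⟩ := h
  exact ⟨a :: u, c, v, rfl, rfl⟩

theorem steps_to_red : ∀ (l : List Char), Relation.ReflTransGen Step l (red l)
  | [] => Relation.ReflTransGen.refl
  | c :: t => by
    have h1 : Relation.ReflTransGen Step (c :: t) (c :: red t) :=
      Relation.ReflTransGen.lift (c :: ·) (fun _ _ => Step_cons c) (steps_to_red t)
    cases h : red t with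
    | nil => simpa [red, h, stepH] using h1
    | cons d ds =>
      by_cases hdc : d = c
      · subst hdc
        refine h1.tail ?_
        simp only [red, h, stepH]
        exact ⟨[], d, ds, rfl, rfl⟩
      · simpa [red, h, stepH, hdc] using h1

theorem red_empty_iff (l : List Char) : red l = [] ↔ Relation.ReflTransGen Step l [] := by
  constructor
  · intro h; have := steps_to_red l; rwa [h] at this
  · intro h; have := red_RTG h; simpa [red] using this.symm

theorem Step_reverse {l l' : List Char} (h : Step l l') : Step l.reverse l'.reverse := by
  obtain ⟨u, c, v, rfl, rfl⟩ := h
  exact ⟨v.reverse, c, u.reverse, by simp, by simp⟩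

theorem red_reverse_empty (l : List Char) : red l.reverse = [] ↔ red l = [] := by
  rw [red_empty_iff, red_empty_iff]
  constructor
  · intro h
    have := Relation.ReflTransGen.lift List.reverse (fun _ _ => Step_reverse) h
    simpa using this
  · intro h
    have := Relation.ReflTransGen.lift List.reverse (fun _ _ => Step_reverse) h
    simpa using this

theorem steps_removePairs : ∀ (l : List Char), Relation.ReflTransGen Step l (removePairs l)
  | [] => Relation.ReflTransGen.refl
  | [_] => Relation.ReflTransGen.refl
  | a :: b :: t => by
    by_cases hab : a = b
    · simp only [removePairs, if_pos hab]
      exact Relation.ReflTransGen.head ⟨[], b, t, by simp [hab], rfl⟩ (steps_removePairs t)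
    · simp only [removePairs, if_neg hab]
      exact Relation.ReflTransGen.lift (a :: ·) (fun _ _ => Step_cons a) (steps_removePairs (b :: t))

theorem removePairs_fix_red : ∀ (l : List Char), removePairs l = l → red l = l
  | [], _ => rfl
  | [c], _ => by simp [red, stepH]
  | a :: b :: t, h => by
    by_cases hab : a = b
    · exfalso
      rw [removePairs, if_pos hab] at h
      have := removePairs_length_le t
      have := congrArg List.length h
      simp only [List.length_cons] at this
      omega
    · rw [removePairs, if_neg hab] at h
      have h2 : removePairs (b :: t) = b :: t := by
        have := List.cons.injEq a (removePairs (b :: t)) a (b :: t) ▸ h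
        exact (List.cons_inj_right a).mp h
      have h3 := removePairs_fix_red (b :: t) h2
      simp only [red] at h3 ⊢
      rw [h3, stepH, if_neg (fun hba => hab hba.symm)]

theorem loopB_eq_red (l : List Char) : loopB l = red l := by
  rw [loopB]
  split
  · next h => exact (removePairs_fix_red l h).symm
  · next h =>
      rw [loopB_eq_red (removePairs l)]
      exact red_RTG (steps_removePairs l)
termination_by l.length
decreasing_by exact removePairs_ne_lt l (by assumption)

theorem foldr_stepH_red (l : List Char) : l.foldr stepH [] = red l := by
  induction l with
  | nil => rfl
  | cons c t ih => simp [red, ih]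

-- ===== VERDICT (by name: the statement is the Claim_ definition above) =====
theorem solution_spec : Claim_equal_solution := by
  intro s _
  show solution s = solution_alt s
  simp only [solution, solution_alt, foldl_stepA, List.reverse_nil, foldr_stepH_red,
    loopB_eq_red]
  by_cases h : red s.toList = []
  · have h2 : red s.toList.reverse = [] := (red_reverse_empty s.toList).mpr h
    simp [h, h2]
  · have h2 : red s.toList.reverse ≠ [] := fun hc => h ((red_reverse_empty s.toList).mp hc)
    simp [h, h2]
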